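-- pv_equiv track=rewrite | github.com/Airlectric/A2SV_Competitive_Programming | codeforces/A_Compare_T_Shirt_Sizes.py | compareTshirt
-- ===== SOURCE A (Python) =====
-- def compareTshirt(a,b):
--     val = {'S':-1, 'M':1, 'L':10, 'X':2}
--
--     vala = 0
--     valb = 0
--     for i in range(len(a)-1,-1,-1):
--         if a[i] == 'X':
--             vala *= val[a[i]]
--         else:
--             vala += val[a[i]]
--
--     for i in range(len(b)-1,-1,-1):
--         if b[i] == 'X':
--             valb *= val[b[i]]
--         else:
--             valb += val[b[i]]
--
--     if vala > valb:
--         return '>'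
--     elif vala < valb:
--         return '<'
--     else:
--         return '='
-- ===== SOURCE B (Python) =====
-- def compareTshirt(a, b):
--     val = {'S': -1, 'M': 1, 'L': 10, 'X': 2}
--
--     def size_value(s):
--         power = 0
--         total = 0
--         for c in s:
--             if c == 'X':
--                 power += 1
--             else:
--                 total += val[c] * 2 ** power
--         return total
--
--     vala = size_value(a)
--     valb = size_value(b)
--     if vala > valb:
--         return '>'
--     elif vala < valb:
--         return '<'
--     else:
--         return '='
-- ===== Notes on version B (the rewrite author's own statement) =====
-- stated objective: alternative
-- what changed: Replaces A's reversed index loop (multiply the accumulator by 2 at each 'X') with a single forward pass per string that keeps a power-of-two counter of 'X's seen so far and adds val[c]*2**power for each non-'X' letter.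
import Mathlib
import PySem

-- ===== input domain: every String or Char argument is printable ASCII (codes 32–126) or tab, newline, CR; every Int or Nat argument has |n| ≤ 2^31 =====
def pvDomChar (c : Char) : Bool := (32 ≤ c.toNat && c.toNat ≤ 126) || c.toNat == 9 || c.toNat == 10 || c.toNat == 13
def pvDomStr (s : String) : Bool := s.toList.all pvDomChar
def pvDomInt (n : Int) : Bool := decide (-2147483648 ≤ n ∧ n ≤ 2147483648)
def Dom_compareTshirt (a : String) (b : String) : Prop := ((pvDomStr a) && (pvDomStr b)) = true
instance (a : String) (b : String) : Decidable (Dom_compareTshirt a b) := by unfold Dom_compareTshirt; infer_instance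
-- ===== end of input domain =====

-- B replaces A's reversed index loop with one forward pass per string keeping a power-of-two
-- counter of 'X's seen so far (objective: alternative decomposition; return value only).

-- val = {'S':-1, 'M':1, 'L':10, 'X':2}
def pvVal : PySem.Dict Char Int := PySem.Dict.ofList [('S', -1), ('M', 1), ('L', 10), ('X', 2)]

-- ===== PORT A =====
-- for i in range(len(s)-1,-1,-1): if s[i]=='X': v *= val[s[i]] else: v += val[s[i]]
-- (val[c] ported as getD with default 0; a KeyError char is excluded by Pre_)
def pvSizeA (s : List Char) : Int :=
  (PySem.List.pyRange ((s.length : Int) - 1) (-1) (-1)).foldl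
    (fun acc i =>
      if PySem.List.pyGetD s i ' ' == 'X' then acc * pvVal.getD (PySem.List.pyGetD s i ' ') 0
      else acc + pvVal.getD (PySem.List.pyGetD s i ' ') 0) 0

def compareTshirt (a : String) (b : String) : String :=
  let vala := pvSizeA a.toList
  let valb := pvSizeA b.toList
  if vala > valb then ">" else if vala < valb then "<" else "="

-- ===== PORT B =====
-- forward pass: power = #'X' seen so far, total += val[c] * 2**power for non-'X' c
def pvSizeB (s : List Char) : Int :=
  (s.foldl
    (fun (st : Nat × Int) c =>
      if c == 'X' then (st.1 + 1, st.2)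
      else (st.1, st.2 + pvVal.getD c 0 * 2 ^ st.1)) ((0 : Nat), (0 : Int))).2

def compareTshirt_alt (a : String) (b : String) : String :=
  let vala := pvSizeB a.toList
  let valb := pvSizeB b.toList
  if vala > valb then ">" else if vala < valb then "<" else "="

-- ===== PRECONDITION & SPEC =====
-- Pre_ excludes exactly the inputs where Python A raises KeyError: a character outside 'SMLX'.
def Pre_compareTshirt (a : String) (b : String) : Prop :=
  (a.toList.all (fun c => c ∈ (['S', 'M', 'L', 'X'] : List Char))
    && b.toList.all (fun c => c ∈ (['S', 'M', 'L', 'X'] : List Char))) = true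
instance (a : String) (b : String) : Decidable (Pre_compareTshirt a b) := by
  unfold Pre_compareTshirt; infer_instance

def pvWitness_compareTshirt : String × String := ("XL", "XXS")

def Spec_compareTshirt (a : String) (b : String) (out : String) : Prop := out = compareTshirt_alt a b
instance (a : String) (b : String) (out : String) : Decidable (Spec_compareTshirt a b out) := by
  unfold Spec_compareTshirt; infer_instance

-- ===== CLAIM (what is proved, stated in full; the proofs are below) =====
def Claim_equal_compareTshirt : Prop := ∀ (a : String) (b : String), Dom_compareTshirt a b → Pre_compareTshirt a b → Spec_compareTshirt a b (compareTshirt a b)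

-- ===== LEMMAS AND PROOFS =====

-- the common right-fold value of a size string
def pvV (s : List Char) : Int :=
  s.foldr (fun c acc => if c == 'X' then acc * pvVal.getD c 0 else acc + pvVal.getD c 0) 0

lemma pvV_cons (c : Char) (tl : List Char) :
    pvV (c :: tl) = if c == 'X' then pvV tl * pvVal.getD c 0 else pvV tl + pvVal.getD c 0 := rfl

lemma pvA_gen (s : List Char) : ∀ init : Int,
    (PySem.List.pyRange ((s.length : Int) - 1) (-1) (-1)).foldl
      (fun acc i =>
        if PySem.List.pyGetD s i ' ' == 'X' then acc * pvVal.getD (PySem.List.pyGetD s i ' ') 0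
        else acc + pvVal.getD (PySem.List.pyGetD s i ' ') 0) init
    = s.foldr (fun c acc => if c == 'X' then acc * pvVal.getD c 0 else acc + pvVal.getD c 0) init := by
  induction s using List.reverseRecOn with
  | nil =>
    intro init
    rw [PySem.List.pyRange_neg_one_eq_nil (by norm_num)]
    simp
  | append_singleton ys c ih =>
    intro init
    have hlen : (((ys ++ [c]).length : Int)) - 1 = (ys.length : Int) := by simp
    rw [hlen, PySem.List.pyRange_neg_one_cons (by omega)]
    simp only [List.foldl_cons]
    have hget : PySem.List.pyGetD (ys ++ [c]) ((ys.length : Int)) ' ' = c := by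
      simp [PySem.List.pyGetD_natCast, List.getD]
    rw [hget]
    have hcongr := PySem.List.foldl_congr_mem
      (l := PySem.List.pyRange ((ys.length : Int) - 1) (-1) (-1))
      (f := fun acc i =>
        if PySem.List.pyGetD (ys ++ [c]) i ' ' == 'X' then acc * pvVal.getD (PySem.List.pyGetD (ys ++ [c]) i ' ') 0
        else acc + pvVal.getD (PySem.List.pyGetD (ys ++ [c]) i ' ') 0)
      (g := fun acc i =>
        if PySem.List.pyGetD ys i ' ' == 'X' then acc * pvVal.getD (PySem.List.pyGetD ys i ' ') 0
        else acc + pvVal.getD (PySem.List.pyGetD ys i ' ') 0)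
      (init := if (c == 'X') = true then init * pvVal.getD c 0 else init + pvVal.getD c 0)
      (by
        intro acc i hi
        rw [PySem.List.mem_pyRange_neg_one] at hi
        have h0 : (0 : Int) ≤ i := by omega
        have h2 : i < (ys.length : Int) := by omega
        have h1 : i < ((ys ++ [c]).length : Int) := by simp; omega
        simp only [PySem.List.pyGetD_eq_getElem (ys ++ [c]) ' ' h0 h1,
          PySem.List.pyGetD_eq_getElem ys ' ' h0 h2]
        rw [List.getElem_append_left])
    rw [hcongr, ih, List.foldr_append]
    simp

lemma pvB_gen (s : List Char) : ∀ (p : Nat) (t : Int),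
    (s.foldl
      (fun (st : Nat × Int) c =>
        if c == 'X' then (st.1 + 1, st.2)
        else (st.1, st.2 + pvVal.getD c 0 * 2 ^ st.1)) (p, t)).2
    = t + 2 ^ p * pvV s := by
  induction s with
  | nil => intro p t; simp [pvV]
  | cons c tl ih =>
    intro p t
    simp only [List.foldl_cons, pvV_cons]
    by_cases h : c == 'X'
    · have hc : c = 'X' := eq_of_beq h
      subst hc
      rw [if_pos (show ('X' == 'X') = true from rfl), if_pos (show ('X' == 'X') = true from rfl)]
      rw [ih]
      have hv : pvVal.getD 'X' 0 = 2 := by decide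
      rw [hv, pow_succ]
      ring
    · simp only [if_neg h]
      rw [ih]
      ring

-- A's countdown index loop is the right fold pvV
lemma pvSizeA_eq_pvV (s : List Char) : pvSizeA s = pvV s := by
  unfold pvSizeA pvV
  exact pvA_gen s 0

lemma pvSizeB_eq_pvV (s : List Char) : pvSizeB s = pvV s := by
  unfold pvSizeB
  rw [pvB_gen s 0 0]
  simp

-- ===== VERDICT (by name: the statement is the Claim_ definition above) =====
theorem compareTshirt_spec : Claim_equal_compareTshirt := by
  intro a b _ _
  unfold Spec_compareTshirt compareTshirt compareTshirt_alt
  rw [pvSizeA_eq_pvV, pvSizeA_eq_pvV, pvSizeB_eq_pvV, pvSizeB_eq_pvV]
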